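-- pv_equiv track=rewrite | github.com/Karan-21/LeetCode-Data-Structure-and-Algorithm | countSubmatrices.py | countSubmatrices
-- ===== SOURCE A (Python) =====
-- def countSubmatrices(matrix, limit):
--
--     rows = len(matrix)                 # number of rows
--     cols = len(matrix[0])              # number of columns
--
--     sum_mat = [[0] * (cols + 1) for _ in range(rows + 1)]  # prefix matrix
--     result = 0                         # count of valid submatrices
--
--     # build prefix sum matrix
--     for r in range(1, rows + 1):
--         for c in range(1, cols + 1):
--
--             # prefix formula
--             sum_mat[r][c] = matrix[r - 1][c - 1] \
--                            + sum_mat[r - 1][c] \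
--                            + sum_mat[r][c - 1] \
--                            - sum_mat[r - 1][c - 1]
--
--     # count valid submatrices
--     for r in range(1, rows + 1):
--         for c in range(1, cols + 1):
--
--             if sum_mat[r][c] <= limit:   # condition check
--                 result += 1
--
--     return result
-- ===== SOURCE B (Python) =====
-- def countSubmatrices(matrix, limit):
--     rows = len(matrix)
--     cols = len(matrix[0])
--     colcum = [0] * cols          # column sums of rows seen so far
--     result = 0
--     for r in range(rows):
--         row = matrix[r]
--         run = 0
--         for c in range(cols):
--             colcum[c] += row[c]
--             run += colcum[c]     # run == origin-anchored sum ending at (r, c)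
--             if run <= limit:
--                 result += 1
--     return result
-- ===== Notes on version B (the rewrite author's own statement) =====
-- stated objective: simpler
-- what changed: Replaces the (rows+1)x(cols+1) 2D prefix-sum table and the second counting sweep with a single fused pass keeping only a 1D rolling column-sum array whose running left-to-right prefix is the anchored sum compared against limit; constant-factor speedup from O(cols) memory and one pass instead of allocating and re-traversing the full table.
import Mathlib
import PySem

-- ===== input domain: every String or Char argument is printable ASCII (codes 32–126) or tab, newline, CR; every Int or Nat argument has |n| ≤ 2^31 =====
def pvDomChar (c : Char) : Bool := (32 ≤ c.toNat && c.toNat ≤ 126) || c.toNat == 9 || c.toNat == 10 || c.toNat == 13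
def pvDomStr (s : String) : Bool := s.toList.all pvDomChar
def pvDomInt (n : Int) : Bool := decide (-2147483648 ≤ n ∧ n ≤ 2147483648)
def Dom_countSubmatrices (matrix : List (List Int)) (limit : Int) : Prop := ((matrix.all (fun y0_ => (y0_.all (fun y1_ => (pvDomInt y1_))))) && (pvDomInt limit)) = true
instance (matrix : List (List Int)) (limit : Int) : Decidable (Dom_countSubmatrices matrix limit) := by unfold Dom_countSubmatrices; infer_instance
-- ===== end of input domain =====

-- B replaces A's full 2D prefix-sum table and second counting sweep with one fused pass
-- over the rows keeping a 1D rolling column-sum array (objective: simpler, O(cols) space).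

-- ===== PORT A =====
-- inner c-loop of the build phase: walks matrix row `ms` and the previous table row's
-- tail `prevRest`, with `pp` = sum_mat[r-1][c-1] and `left` = sum_mat[r][c-1]
def pvBuildRow : List Int → Int → Int → List Int → List Int
  | a :: ms, pp, left, p :: ps =>
      let v := a + p + left - pp
      v :: pvBuildRow ms p v ps
  | _, _, _, _ => []

-- outer r-loop of the build phase: each table row is 0 followed by the computed tail
def pvBuildTable : List (List Int) → List Int → List (List Int)
  | [], _ => []
  | m :: ms, prev =>
      let newRow := (0 : Int) :: pvBuildRow m 0 0 (prev.drop 1)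
      newRow :: pvBuildTable ms newRow

def countSubmatrices (matrix : List (List Int)) (limit : Int) : Int :=
  let cols := (matrix.headD []).length
  let table := pvBuildTable matrix (List.replicate (cols + 1) (0 : Int))
  -- second double loop: count table entries (c = 1..cols) that are ≤ limit
  table.foldl
    (fun res row => (row.drop 1).foldl (fun a v => if v ≤ limit then a + 1 else a) res)
    0

-- ===== PORT B =====
-- fused inner c-loop of Source B: updates colcum in place and the running prefix `run`;
-- returns the updated colcum together with the updated result
def pvInner (limit : Int) : List Int → List Int → Int → Int → List Int × Int
  | cc :: ccs, a :: as_, run, res =>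
      let cc' := cc + a
      let run' := run + cc'
      let out := pvInner limit ccs as_ run' (if run' ≤ limit then res + 1 else res)
      (cc' :: out.1, out.2)
  | _, _, _, res => ([], res)

def pvRows (limit : Int) : List (List Int) → List Int → Int → Int
  | [], _, res => res
  | m :: ms, colcum, res =>
      let out := pvInner limit colcum m 0 res
      pvRows limit ms out.1 out.2

def countSubmatrices_alt (matrix : List (List Int)) (limit : Int) : Int :=
  let cols := (matrix.headD []).length
  pvRows limit matrix (List.replicate cols (0 : Int)) 0

-- ===== PRECONDITION & SPEC =====
-- Pre_ excludes exactly the inputs where Python A raises IndexError: the empty matrix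
-- (matrix[0]) and matrices with a row shorter than the first row (matrix[r-1][c-1]).
def Pre_countSubmatrices (matrix : List (List Int)) (limit : Int) : Prop :=
  matrix ≠ [] ∧ ∀ row ∈ matrix, (matrix.headD []).length ≤ row.length

instance (matrix : List (List Int)) (limit : Int) : Decidable (Pre_countSubmatrices matrix limit) := by
  unfold Pre_countSubmatrices; infer_instance

def pvWitness_countSubmatrices : List (List Int) × Int := ([[1, 2], [3, 4]], 4)

def Spec_countSubmatrices (matrix : List (List Int)) (limit : Int) (out : Int) : Prop := out = countSubmatrices_alt matrix limit
instance (matrix : List (List Int)) (limit : Int) (out : Int) : Decidable (Spec_countSubmatrices matrix limit out) := by unfold Spec_countSubmatrices; infer_instance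

-- ===== CLAIM (what is proved, stated in full; the proofs are below) =====
def Claim_equal_countSubmatrices : Prop := ∀ (matrix : List (List Int)) (limit : Int), Dom_countSubmatrices matrix limit → Pre_countSubmatrices matrix limit → Spec_countSubmatrices matrix limit (countSubmatrices matrix limit)

-- ===== LEMMAS AND PROOFS =====

-- running prefix sums of a list, starting from s
def pvPref (s : Int) : List Int → List Int
  | [] => []
  | c :: cs => (s + c) :: pvPref (s + c) cs

theorem pvPref_replicate (n : Nat) : pvPref 0 (List.replicate n 0) = List.replicate n 0 := by
  induction n with
  | zero => rfl
  | succ k ih => simp [List.replicate_succ, pvPref, ih]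

-- A's inner build loop, fed the prefix row of the current column sums, produces the
-- prefix row of the updated column sums
theorem pvBuildRow_pref : ∀ (ms cs : List Int) (pp left : Int),
    pvBuildRow ms pp left (pvPref pp cs) = pvPref left (List.zipWith (· + ·) cs ms) := by
  intro ms
  induction ms with
  | nil => intro cs pp left; cases cs <;> rfl
  | cons a ms ih =>
    intro cs pp left
    cases cs with
    | nil => rfl
    | cons c cs =>
      simp only [pvPref, pvBuildRow, List.zipWith]
      rw [show a + (pp + c) + left - pp = left + (c + a) by ring, ih]

-- B's fused inner loop = updated column sums, and its count = A's count over the prefix row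
theorem pvInner_eq (limit : Int) : ∀ (cs ms : List Int) (run res : Int),
    pvInner limit cs ms run res
      = (List.zipWith (· + ·) cs ms,
         (pvPref run (List.zipWith (· + ·) cs ms)).foldl
           (fun a v => if v ≤ limit then a + 1 else a) res) := by
  intro cs
  induction cs with
  | nil => intro ms run res; cases ms <;> rfl
  | cons c cs ih =>
    intro ms run res
    cases ms with
    | nil => rfl
    | cons a ms =>
      simp only [pvInner, List.zipWith, pvPref, List.foldl]
      rw [ih]

-- the main invariant: A's count over the remaining rows of the table, started from the
-- table row 0 :: pvPref 0 colcum, equals B's fused loop over the same rows and colcum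
theorem pvRows_eq (limit : Int) : ∀ (rows : List (List Int)) (colcum : List Int) (res : Int),
    (pvBuildTable rows ((0 : Int) :: pvPref 0 colcum)).foldl
      (fun r row => (row.drop 1).foldl (fun a v => if v ≤ limit then a + 1 else a) r) res
      = pvRows limit rows colcum res := by
  intro rows
  induction rows with
  | nil => intro colcum res; rfl
  | cons m ms ih =>
    intro colcum res
    simp only [pvBuildTable, List.foldl, pvRows, List.drop_succ_cons, List.drop_zero,
      pvBuildRow_pref, pvInner_eq]
    exact ih (List.zipWith (· + ·) colcum m) _

-- ===== VERDICT (by name: the statement is the Claim_ definition above) =====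
theorem countSubmatrices_spec : Claim_equal_countSubmatrices := by
  intro matrix limit _ _
  unfold Spec_countSubmatrices countSubmatrices countSubmatrices_alt
  dsimp only
  rw [List.replicate_succ]
  conv_lhs => rw [← pvPref_replicate (matrix.headD []).length]
  exact pvRows_eq limit matrix _ 0
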